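-- pv_equiv track=rewrite | github.com/france7556-glitch/TextPhantomOCR_Overlay | API/backend/lens_core.py | _pick_hf_fallback_model
-- ===== SOURCE A (Python) =====
-- def _pick_hf_fallback_model(models: list[str]) -> str:
--     if not models:
--         return ""
--     priority_substrings = (
--         "gemma-3",
--         "gemma-2",
--         "llama-3.1",
--         "llama-3",
--         "mistral",
--         "qwen",
--         "glm",
--     )
--     lowered = [(m, m.lower()) for m in models]
--     for sub in priority_substrings:
--         for m, ml in lowered:
--             if sub in ml and ("instruct" in ml or ml.endswith("-it") or ":" in ml):
--                 return m
--     for m, ml in lowered: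
--         if "instruct" in ml or ml.endswith("-it") or ":" in ml:
--             return m
--     return models[0]
-- ===== SOURCE B (Python) =====
-- def _pick_hf_fallback_model(models: list[str]) -> str:
--     if not models:
--         return ""
--     priority_substrings = (
--         "gemma-3",
--         "gemma-2",
--         "llama-3.1",
--         "llama-3",
--         "mistral",
--         "qwen",
--         "glm",
--     )
--
--     def is_instruct(ml: str) -> bool:
--         return "instruct" in ml or ml.endswith("-it") or ":" in ml
--
--     def rank(ml: str) -> int:
--         for i, sub in enumerate(priority_substrings):
--             if sub in ml:
--                 return i
--         return len(priority_substrings)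
--
--     best = None  # (model, rank); strict improvement keeps the earliest
--     for m in models:
--         ml = m.lower()
--         if is_instruct(ml):
--             r = rank(ml)
--             if best is None or r < best[1]:
--                 best = (m, r)
--     return best[0] if best is not None else models[0]
-- ===== Notes on version B (the rewrite author's own statement) =====
-- stated objective: faster
-- what changed: One single scan over the models keeping the best (model, priority-rank) pair with strict improvement replaces A's priority-outer/models-inner rescans plus the separate instruct-fallback loop.
import Mathlib
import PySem

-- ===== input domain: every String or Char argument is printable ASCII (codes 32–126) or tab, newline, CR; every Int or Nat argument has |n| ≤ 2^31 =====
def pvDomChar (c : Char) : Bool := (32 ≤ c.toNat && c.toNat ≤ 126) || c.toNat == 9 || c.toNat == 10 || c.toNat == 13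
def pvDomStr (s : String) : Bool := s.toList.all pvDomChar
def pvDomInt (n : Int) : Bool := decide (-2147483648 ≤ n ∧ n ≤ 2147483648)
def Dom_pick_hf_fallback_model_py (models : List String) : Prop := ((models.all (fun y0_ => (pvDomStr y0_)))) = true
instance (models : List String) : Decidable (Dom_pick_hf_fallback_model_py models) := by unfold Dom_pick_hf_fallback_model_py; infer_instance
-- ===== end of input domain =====

-- B replaces A's priority-outer/models-inner rescans (plus a separate instruct-fallback loop)
-- by ONE scan over the models keeping the best (model, priority-rank) pair; return value only, no side effects.

-- ===== PORT A =====
def pvPrios : List String :=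
  ["gemma-3", "gemma-2", "llama-3.1", "llama-3", "mistral", "qwen", "glm"]

-- A: for sub in priority_substrings: for (m, ml) in lowered: if sub in ml and instruct → return m;
--    then: first instruct → return m; then models[0]; empty → "".
def pick_hf_fallback_model_py (models : List String) : String :=
  if models = [] then ""
  else
    let lowered := models.map (fun m => (m, PySem.Str.lower m))
    match pvPrios.findSome? (fun sub =>
        (lowered.find? (fun p => PySem.Str.isIn sub p.2 &&
          (PySem.Str.isIn "instruct" p.2 || PySem.Str.endswith p.2 "-it" || PySem.Str.isIn ":" p.2))).map Prod.fst) with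
    | some m => m
    | none =>
      match lowered.find? (fun p =>
          PySem.Str.isIn "instruct" p.2 || PySem.Str.endswith p.2 "-it" || PySem.Str.isIn ":" p.2) with
      | some p => p.1
      | none => models.headD ""

-- ===== PORT B =====
def pvIsInstruct (ml : String) : Bool :=
  PySem.Str.isIn "instruct" ml || PySem.Str.endswith ml "-it" || PySem.Str.isIn ":" ml

-- rank(ml): loop over enumerate(priority_substrings), early return on first hit, else len
def pvRank (ml : String) : Nat :=
  (pvPrios.findIdx? (fun sub => PySem.Str.isIn sub ml)).getD pvPrios.length

def pvStep (best : Option (String × Nat)) (m : String) : Option (String × Nat) :=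
  let ml := PySem.Str.lower m
  if pvIsInstruct ml then
    let r := pvRank ml
    match best with
    | none => some (m, r)
    | some b => if r < b.2 then some (m, r) else some b
  else best

def pick_hf_fallback_model_py_alt (models : List String) : String :=
  if models = [] then ""
  else
    match models.foldl pvStep none with
    | some b => b.1
    | none => models.headD ""

-- ===== PRECONDITION & SPEC =====
def Spec_pick_hf_fallback_model_py (models : List String) (out : String) : Prop := out = pick_hf_fallback_model_py_alt models
instance (models : List String) (out : String) : Decidable (Spec_pick_hf_fallback_model_py models out) := by unfold Spec_pick_hf_fallback_model_py; infer_instance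

-- ===== CLAIM (what is proved, stated in full; the proofs are below) =====
def Claim_equal_pick_hf_fallback_model_py : Prop := ∀ (models : List String), Dom_pick_hf_fallback_model_py models → Spec_pick_hf_fallback_model_py models (pick_hf_fallback_model_py models)

-- ===== LEMMAS AND PROOFS =====

-- rank of ml with respect to an arbitrary priority list
def pvRankIn (ps : List String) (ml : String) : Nat :=
  (ps.findIdx? (fun sub => PySem.Str.isIn sub ml)).getD ps.length

-- leftmost argmin of (pvRankIn ps ∘ lower) among instruct models
def pvPick (ps : List String) : List String → Option (String × Nat)
  | [] => none
  | m :: ms =>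
    let ml := PySem.Str.lower m
    if pvIsInstruct ml then
      match pvPick ps ms with
      | some b => if b.2 < pvRankIn ps ml then some b else some (m, pvRankIn ps ml)
      | none => some (m, pvRankIn ps ml)
    else pvPick ps ms

theorem pvRankIn_cons (s : String) (ps : List String) (ml : String) :
    pvRankIn (s :: ps) ml =
      if PySem.Str.isIn s ml then 0 else pvRankIn ps ml + 1 := by
  unfold pvRankIn
  rw [List.findIdx?_cons]
  by_cases h : PySem.Chars.isIn s.toList ml.toList
  · simp [PySem.Str.isIn, h]
  · simp only [PySem.Str.isIn, h, Bool.false_eq_true, if_false]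
    cases ps.findIdx? (fun sub => PySem.Str.isIn sub ml) <;> simp

theorem pvRankIn_le (ps : List String) (ml : String) : pvRankIn ps ml ≤ ps.length := by
  induction ps with
  | nil => simp [pvRankIn]
  | cons s ps ih =>
    rw [pvRankIn_cons]
    split <;> simp <;> omega

-- B side: the fold computes pvPick
theorem pvFold_some (ms : List String) (b : String × Nat) :
    ms.foldl pvStep (some b) =
      match pvPick pvPrios ms with
      | some c => if c.2 < b.2 then some c else some b
      | none => some b := by
  induction ms generalizing b with
  | nil => simp [pvPick]
  | cons m ms ih =>
    rw [List.foldl_cons]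
    have hrr : pvRank (PySem.Str.lower m) = pvRankIn pvPrios (PySem.Str.lower m) := rfl
    by_cases hin : pvIsInstruct (PySem.Str.lower m)
    · have hstep : pvStep (some b) m =
          if pvRankIn pvPrios (PySem.Str.lower m) < b.2
          then some (m, pvRankIn pvPrios (PySem.Str.lower m)) else some b := by
        simp [pvStep, hin, hrr]
      rw [hstep]
      simp only [pvPick, hin, if_true]
      generalize pvRankIn pvPrios (PySem.Str.lower m) = a
      cases hp : pvPick pvPrios ms with
      | none =>
        simp only [hp]
        split <;> rw [ih] <;> simp only [hp] <;>
          first | rfl | (rename_i h1; omega) | (rename_i h1; exfalso; omega)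
      | some c =>
        simp only [hp]
        by_cases h2 : c.2 < a
        · by_cases h1 : a < b.2
          · simp only [if_pos h2, if_pos h1]
            rw [ih]
            simp only [hp, if_pos h2, if_pos (show c.2 < b.2 by omega)]
          · simp only [if_pos h2, if_neg h1]
            rw [ih]
            simp only [hp, if_pos h2]
        · by_cases h1 : a < b.2
          · simp only [if_neg h2, if_pos h1]
            rw [ih]
            simp only [hp, if_neg h2]
          · simp only [if_neg h2, if_neg h1]
            rw [ih]
            simp only [hp, if_neg h2, if_neg h1, if_neg (show ¬ c.2 < b.2 by omega)]
    · have hstep : pvStep (some b) m = some b := by simp [pvStep, hin]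
      rw [hstep]
      simp only [pvPick, hin, Bool.false_eq_true, if_false]
      exact ih b

theorem pvFold_none (ms : List String) :
    ms.foldl pvStep none = pvPick pvPrios ms := by
  cases ms with
  | nil => rfl
  | cons m ms =>
    rw [List.foldl_cons]
    have hrr : pvRank (PySem.Str.lower m) = pvRankIn pvPrios (PySem.Str.lower m) := rfl
    by_cases hin : pvIsInstruct (PySem.Str.lower m)
    · have hstep : pvStep none m = some (m, pvRankIn pvPrios (PySem.Str.lower m)) := by
        simp [pvStep, hin, hrr]
      rw [hstep, pvFold_some]
      simp only [pvPick, hin, if_true]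
    · have hstep : pvStep none m = none := by simp [pvStep, hin]
      rw [hstep]
      simp only [pvPick, hin, Bool.false_eq_true, if_false]
      exact pvFold_none ms

-- A side helpers
def pvLw (ms : List String) : List (String × String) := ms.map (fun m => (m, PySem.Str.lower m))

theorem pvFind_none_shift (s : String) (ps ms : List String)
    (h : (pvLw ms).find? (fun p => PySem.Str.isIn s p.2 && pvIsInstruct p.2) = none) :
    pvPick (s :: ps) ms = (pvPick ps ms).map (fun b => (b.1, b.2 + 1)) := by
  induction ms with
  | nil => simp [pvPick]
  | cons m ms ih =>
    have hlw : pvLw (m :: ms) = (m, PySem.Str.lower m) :: pvLw ms := rfl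
    by_cases hpred : (PySem.Str.isIn s (PySem.Str.lower m) && pvIsInstruct (PySem.Str.lower m)) = true
    · rw [hlw, List.find?_cons_of_pos (by simpa using hpred)] at h; cases h
    · rw [hlw, List.find?_cons_of_neg (by simpa using hpred)] at h
      have ih' := ih h
      by_cases hin : pvIsInstruct (PySem.Str.lower m)
      · have hs : PySem.Str.isIn s (PySem.Str.lower m) = false := by
          cases hq : PySem.Str.isIn s (PySem.Str.lower m)
          · rfl
          · exact absurd (by simp only [Bool.and_eq_true]; exact ⟨hq, hin⟩) hpred
        have hr : pvRankIn (s :: ps) (PySem.Str.lower m) = pvRankIn ps (PySem.Str.lower m) + 1 := by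
          rw [pvRankIn_cons, if_neg (by rw [hs]; simp)]
        simp only [pvPick, hin, if_true, ih', hr]
        cases hp : pvPick ps ms with
        | none => simp
        | some b =>
          simp only [Option.map_some]
          by_cases hb : b.2 < pvRankIn ps (PySem.Str.lower m)
          · rw [if_pos (by simpa using hb), if_pos hb]
            rfl
          · rw [if_neg (by simpa using hb), if_neg hb]
            rfl
      · simp only [pvPick, hin, Bool.false_eq_true, if_false]
        exact ih'

theorem pvFind_some_pick (s : String) (ps ms : List String) (q : String × String)
    (h : (pvLw ms).find? (fun p => PySem.Str.isIn s p.2 && pvIsInstruct p.2) = some q) :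
    pvPick (s :: ps) ms = some (q.1, 0) := by
  induction ms with
  | nil => simp [pvLw] at h
  | cons m ms ih =>
    have hlw : pvLw (m :: ms) = (m, PySem.Str.lower m) :: pvLw ms := rfl
    by_cases hpred : (PySem.Str.isIn s (PySem.Str.lower m) && pvIsInstruct (PySem.Str.lower m)) = true
    · rw [hlw, List.find?_cons_of_pos (by simpa using hpred)] at h
      cases h
      have hin : pvIsInstruct (PySem.Str.lower m) = true := (Bool.and_eq_true_iff.mp hpred).2
      have hs : PySem.Str.isIn s (PySem.Str.lower m) = true := (Bool.and_eq_true_iff.mp hpred).1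
      have hr : pvRankIn (s :: ps) (PySem.Str.lower m) = 0 := by
        rw [pvRankIn_cons, if_pos hs]
      simp only [pvPick, hin, if_true, hr]
      cases hp : pvPick (s :: ps) ms with
      | none => rfl
      | some b => simp
    · rw [hlw, List.find?_cons_of_neg (by simpa using hpred)] at h
      have ih' := ih h
      by_cases hin : pvIsInstruct (PySem.Str.lower m)
      · have hs : PySem.Str.isIn s (PySem.Str.lower m) = false := by
          cases hq : PySem.Str.isIn s (PySem.Str.lower m)
          · rfl
          · exact absurd (by simp only [Bool.and_eq_true]; exact ⟨hq, hin⟩) hpred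
        have hr : pvRankIn (s :: ps) (PySem.Str.lower m) = pvRankIn ps (PySem.Str.lower m) + 1 := by
          rw [pvRankIn_cons, if_neg (by rw [hs]; simp)]
        simp only [pvPick, hin, if_true, ih', hr]
        rw [if_pos (by omega)]
      · simp only [pvPick, hin, Bool.false_eq_true, if_false]
        exact ih'

theorem pvA_main (ps ms : List String) :
    ps.findSome? (fun sub =>
        ((pvLw ms).find? (fun p => PySem.Str.isIn sub p.2 && pvIsInstruct p.2)).map Prod.fst) =
      match pvPick ps ms with
      | some b => if b.2 < ps.length then some b.1 else none
      | none => none := by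
  induction ps with
  | nil =>
    simp only [List.findSome?_nil]
    cases hp : pvPick [] ms with
    | none => rfl
    | some b => simp
  | cons s ps ih =>
    rw [List.findSome?_cons]
    cases hf : (pvLw ms).find? (fun p => PySem.Str.isIn s p.2 && pvIsInstruct p.2) with
    | some q =>
      simp only [hf, Option.map_some]
      rw [pvFind_some_pick s ps ms q hf]
      simp
    | none =>
      simp only [hf, Option.map_none]
      rw [ih, pvFind_none_shift s ps ms hf]
      cases hp : pvPick ps ms with
      | none => rfl
      | some b =>
        simp only [Option.map_some, List.length_cons]
        by_cases hb : b.2 < ps.length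
        · rw [if_pos hb, if_pos (by omega)]
        · rw [if_neg hb, if_neg (by omega)]

theorem pvPick_max_find (ps ms : List String) (b : String × Nat)
    (h : pvPick ps ms = some b) (hb : ps.length ≤ b.2) :
    (pvLw ms).find? (fun p => pvIsInstruct p.2) = some (b.1, PySem.Str.lower b.1) := by
  induction ms generalizing b with
  | nil => simp [pvPick] at h
  | cons m ms ih =>
    have hlw : pvLw (m :: ms) = (m, PySem.Str.lower m) :: pvLw ms := rfl
    by_cases hin : pvIsInstruct (PySem.Str.lower m)
    · rw [hlw, List.find?_cons_of_pos (by simpa using hin)]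
      simp only [pvPick, hin, if_true] at h
      cases hp : pvPick ps ms with
      | none =>
        rw [hp] at h
        cases h
        rfl
      | some c =>
        rw [hp] at h
        simp only at h
        split at h
        · rename_i hc
          cases h
          have := pvRankIn_le ps (PySem.Str.lower m)
          omega
        · cases h
          rfl
    · rw [hlw, List.find?_cons_of_neg (by simpa using hin)]
      simp only [pvPick, hin, Bool.false_eq_true, if_false] at h
      exact ih b h hb

theorem pvPick_none_find (ps ms : List String)
    (h : pvPick ps ms = none) :
    (pvLw ms).find? (fun p => pvIsInstruct p.2) = none := by
  induction ms with
  | nil => rfl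
  | cons m ms ih =>
    have hlw : pvLw (m :: ms) = (m, PySem.Str.lower m) :: pvLw ms := rfl
    by_cases hin : pvIsInstruct (PySem.Str.lower m)
    · exfalso
      simp only [pvPick, hin, if_true] at h
      cases hp : pvPick ps ms <;> rw [hp] at h <;> simp at h
      split at h <;> cases h
    · rw [hlw, List.find?_cons_of_neg (by simpa using hin)]
      simp only [pvPick, hin, Bool.false_eq_true, if_false] at h
      exact ih h

-- ===== VERDICT (by name: the statement is the Claim_ definition above) =====
theorem pick_hf_fallback_model_py_spec : Claim_equal_pick_hf_fallback_model_py := by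
  intro models _
  unfold Spec_pick_hf_fallback_model_py pick_hf_fallback_model_py pick_hf_fallback_model_py_alt
  by_cases hm : models = []
  · simp [hm]
  · simp only [if_neg hm]
    rw [pvFold_none]
    show (match pvPrios.findSome? (fun sub =>
            ((pvLw models).find? (fun p => PySem.Str.isIn sub p.2 && pvIsInstruct p.2)).map Prod.fst) with
          | some m => m
          | none =>
            match (pvLw models).find? (fun p => pvIsInstruct p.2) with
            | some p => p.1
            | none => models.headD "") =
        match pvPick pvPrios models with
        | some b => b.1
        | none => models.headD ""
    rw [pvA_main]
    cases hp : pvPick pvPrios models with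
    | none =>
      simp only [hp]
      rw [pvPick_none_find pvPrios models hp]
    | some b =>
      simp only [hp]
      by_cases hb : b.2 < pvPrios.length
      · rw [if_pos hb]
      · rw [if_neg hb, pvPick_max_find pvPrios models b hp (by omega)]
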